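-- pv_equiv track=rewrite | github.com/ZhouningMan/LeetCodePython | system_design_ladder/ConsistentHashing.py | consistentHashing
-- ===== SOURCE A (Python) =====
-- def consistentHashing(n):
--     results = [[0, 359, 1]]
--     for i in range(1, n): # incrementally build the matrix
--         index = 0
--         # locate the range to be split
--         for j in range(i):
--             if results[j][1] - results[j][0] > results[index][1] - results[index][0]:
--                 index = j
--         x, y = results[index][0], results[index][1]
--         results[index][1] = (x + y) // 2
--         results.append([(x + y) // 2 + 1, y, i + 1])
--
--     return results
-- ===== SOURCE B (Python) =====
-- import bisect
--
-- def consistentHashing(n):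
--     # Keep the pending ranges in a list sorted ascending by (-width, index):
--     # the head is always the widest range with the smallest index, so the
--     # O(n) argmax rescan of every iteration disappears.
--     results = [[0, 359, 1]]
--     pending = [(-359, 0)]
--     for i in range(1, n):
--         _, idx = pending.pop(0)
--         x, y = results[idx][0], results[idx][1]
--         mid = (x + y) // 2
--         results[idx][1] = mid
--         results.append([mid + 1, y, i + 1])
--         bisect.insort(pending, (x - mid, idx))
--         bisect.insort(pending, (mid + 1 - y, i))
--     return results
-- ===== Notes on version B (the rewrite author's own statement) =====
-- stated objective: faster
-- what changed: A rescans all current ranges every iteration to find the widest one; B keeps the pending ranges in a list sorted by (-width, index) (bisect.insort), popping the head and inserting the two halves, so the inner argmax scan disappears.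
import Mathlib
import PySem

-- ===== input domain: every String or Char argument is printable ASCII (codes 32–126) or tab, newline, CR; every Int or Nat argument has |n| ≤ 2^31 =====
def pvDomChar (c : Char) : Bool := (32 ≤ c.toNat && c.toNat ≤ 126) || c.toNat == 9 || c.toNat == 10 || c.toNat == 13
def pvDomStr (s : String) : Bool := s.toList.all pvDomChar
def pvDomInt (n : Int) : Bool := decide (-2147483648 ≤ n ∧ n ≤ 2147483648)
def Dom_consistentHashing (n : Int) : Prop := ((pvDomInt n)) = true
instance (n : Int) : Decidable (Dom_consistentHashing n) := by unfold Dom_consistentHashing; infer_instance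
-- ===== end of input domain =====

-- B replaces A's per-iteration argmax rescan by a pending list kept sorted by (-width, index)
-- (pop the head, insert the two halves with bisect.insort); same return value, measurably faster.

-- ===== PORT A =====
-- results[j], a row access (always in range when reached)
def pvEnt (rs : List (List Int)) (j : Int) : List Int := PySem.List.pyGetD rs j []
-- results[j][1] - results[j][0]
def pvWid (rs : List (List Int)) (j : Int) : Int :=
  PySem.List.pyGetD (pvEnt rs j) 1 0 - PySem.List.pyGetD (pvEnt rs j) 0 0

-- one iteration of A's outer loop
def stepA (rs : List (List Int)) (i : Int) : List (List Int) :=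
  let index := (PySem.List.pyRange 0 i 1).foldl
      (fun index j => if pvWid rs j > pvWid rs index then j else index) 0
  let x := PySem.List.pyGetD (pvEnt rs index) 0 0
  let y := PySem.List.pyGetD (pvEnt rs index) 1 0
  let rs' := PySem.List.pySetD rs index
      (PySem.List.pySetD (pvEnt rs index) 1 (PySem.Int.floordiv (x + y) 2))
  rs' ++ [[PySem.Int.floordiv (x + y) 2 + 1, y, i + 1]]

def consistentHashing (n : Int) : List (List Int) :=
  (PySem.List.pyRange 1 n 1).foldl stepA [[0, 359, 1]]

-- ===== PORT B =====
-- tuple comparison (-width, index) < (-width', index')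
def pendLt (p q : Int × Int) : Bool := p.1 < q.1 || (p.1 == q.1 && p.2 < q.2)

-- bisect.insort into a sorted list (insert after equal keys)
def insortB (l : List (Int × Int)) (p : Int × Int) : List (Int × Int) :=
  match l with
  | [] => [p]
  | q :: rest => if pendLt p q then p :: q :: rest else q :: insortB rest p

-- one iteration of B's loop; state = (results, pending).  pending is never empty
-- when this is reached (it holds one tuple per row); the [] branch only makes the
-- function total (Python's pop(0) would raise there).
def stepB (st : List (List Int) × List (Int × Int)) (i : Int) :
    List (List Int) × List (Int × Int) :=
  match st.2 with
  | [] => st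
  | (_, idx) :: pend =>
    let rs := st.1
    let x := PySem.List.pyGetD (pvEnt rs idx) 0 0
    let y := PySem.List.pyGetD (pvEnt rs idx) 1 0
    let mid := PySem.Int.floordiv (x + y) 2
    let rs' := PySem.List.pySetD rs idx (PySem.List.pySetD (pvEnt rs idx) 1 mid)
    (rs' ++ [[mid + 1, y, i + 1]], insortB (insortB pend (x - mid, idx)) (mid + 1 - y, i))

def consistentHashing_alt (n : Int) : List (List Int) :=
  ((PySem.List.pyRange 1 n 1).foldl stepB ([[0, 359, 1]], [(-359, 0)])).1

-- ===== PRECONDITION & SPEC =====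
def Spec_consistentHashing (n : Int) (out : List (List Int)) : Prop := out = consistentHashing_alt n
instance (n : Int) (out : List (List Int)) : Decidable (Spec_consistentHashing n out) := by unfold Spec_consistentHashing; infer_instance

-- ===== CLAIM (what is proved, stated in full; the proofs are below) =====
def Claim_equal_consistentHashing : Prop := ∀ (n : Int), Dom_consistentHashing n → Spec_consistentHashing n (consistentHashing n)

-- ===== LEMMAS AND PROOFS =====

-- strict lexicographic order on (-width, index), as a Prop
def PLT (p q : Int × Int) : Prop := p.1 < q.1 ∨ (p.1 = q.1 ∧ p.2 < q.2)
-- its reflexive closure (used for sortedness of the pending list)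
def PLE (p q : Int × Int) : Prop := ¬ PLT q p

theorem pendLt_iff (p q : Int × Int) : pendLt p q = true ↔ PLT p q := by
  simp [pendLt, PLT]

-- the key (-width, index) of every current row
def keysOf (rs : List (List Int)) : List (Int × Int) :=
  (List.range rs.length).map
    (fun j => ((rs.getD j []).getD 0 0 - (rs.getD j []).getD 1 0, (j : Int)))

-- B's loop invariant
def InvB (rs : List (List Int)) (pend : List (Int × Int)) : Prop :=
  (∀ r ∈ rs, r.length = 3) ∧ pend.Perm (keysOf rs) ∧ pend.Pairwise PLE

theorem insortB_perm (l : List (Int × Int)) (p : Int × Int) : (insortB l p).Perm (p :: l) := by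
  induction l with
  | nil => simp [insortB]
  | cons q rest ih =>
    simp only [insortB]
    split
    · exact List.Perm.refl _
    · exact ((ih.cons q).trans (List.Perm.swap p q rest))

theorem insortB_sorted (l : List (Int × Int)) (p : Int × Int) (h : l.Pairwise PLE) :
    (insortB l p).Pairwise PLE := by
  induction l with
  | nil => simp [insortB]
  | cons q rest ih =>
    rcases List.pairwise_cons.1 h with ⟨hq, hrest⟩
    simp only [insortB]
    split
    · rename_i hlt
      rw [pendLt_iff] at hlt
      refine List.pairwise_cons.2 ⟨?_, h⟩
      intro r hr
      rcases List.mem_cons.1 hr with hr | hr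
      · subst hr
        unfold PLE PLT at *
        omega
      · have := hq r hr
        unfold PLE PLT at *
        omega
    · rename_i hnlt
      rw [pendLt_iff] at hnlt
      refine List.pairwise_cons.2 ⟨?_, ih hrest⟩
      intro r hr
      have hmem : r ∈ p :: rest := (insortB_perm rest p).mem_iff.1 hr
      rcases List.mem_cons.1 hmem with hr' | hr'
      · subst hr'
        unfold PLE
        exact hnlt
      · exact hq r hr'

theorem length_keysOf (rs : List (List Int)) : (keysOf rs).length = rs.length := by
  simp [keysOf]

theorem keysOf_getElem (rs : List (List Int)) (j : Nat) (hj : j < rs.length) :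
    (keysOf rs)[j]'(by simpa [length_keysOf] using hj)
      = ((rs.getD j []).getD 0 0 - (rs.getD j []).getD 1 0, (j : Int)) := by
  simp [keysOf]


-- width of row k, Nat-indexed
def wN (rs : List (List Int)) (k : Nat) : Int :=
  (rs.getD k []).getD 1 0 - (rs.getD k []).getD 0 0

theorem pvWid_natCast (rs : List (List Int)) (k : Nat) : pvWid rs (k : Int) = wN rs k := by
  simp [pvWid, pvEnt, wN, PySem.List.pyGetD_ofNat']

-- A's inner scan returns the first index of maximal width
theorem scan_spec (rs : List (List Int)) (m : Nat) (hm : 1 ≤ m) :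
    ∃ t : Nat,
      (List.range m).foldl
        (fun (acc : Int) (k : Nat) => if pvWid rs (k : Int) > pvWid rs acc then (k : Int) else acc) 0 = (t : Int)
      ∧ t < m ∧ (∀ k < m, wN rs k ≤ wN rs t) ∧ (∀ k < t, wN rs k < wN rs t) := by
  induction m with
  | zero => omega
  | succ m ih =>
    rcases Nat.eq_or_lt_of_le hm with hm1 | hm1
    · refine ⟨0, ?_, by omega, ?_, by omega⟩
      · rw [← hm1]
        simp
      · intro k hk
        rw [← hm1] at hk
        interval_cases k
        omega
    · have hm' : 1 ≤ m := by omega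
      obtain ⟨t, hfold, htlt, hmax, hfirst⟩ := ih hm'
      rw [List.range_succ, List.foldl_append, hfold]
      simp only [List.foldl_cons, List.foldl_nil, pvWid_natCast]
      by_cases h : wN rs m > wN rs t
      · refine ⟨m, by simp [h], by omega, ?_, ?_⟩
        · intro k hk
          rcases Nat.lt_succ_iff_lt_or_eq.1 hk with hk | hk
          · exact le_of_lt (lt_of_le_of_lt (hmax k hk) h)
          · subst hk; exact le_refl _
        · intro k hk
          exact lt_of_le_of_lt (hmax k (by omega)) h
      · refine ⟨t, by simp [h], by omega, ?_, hfirst⟩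
        intro k hk
        rcases Nat.lt_succ_iff_lt_or_eq.1 hk with hk | hk
        · exact hmax k hk
        · subst hk; omega

theorem mem_keysOf (rs : List (List Int)) (p : Int × Int) (h : p ∈ keysOf rs) :
    ∃ j < rs.length, p = ((rs.getD j []).getD 0 0 - (rs.getD j []).getD 1 0, (j : Int)) := by
  simp only [keysOf, List.mem_map, List.mem_range] at h
  obtain ⟨j, hj, hp⟩ := h
  exact ⟨j, hj, hp.symm⟩

theorem keysOf_getElem' (rs : List (List Int)) (j : Nat) (hj : j < rs.length) :
    ((rs.getD j []).getD 0 0 - (rs.getD j []).getD 1 0, (j : Int)) ∈ keysOf rs := by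
  simp only [keysOf, List.mem_map, List.mem_range]
  exact ⟨j, hj, rfl⟩

theorem keysOf_set (rs : List (List Int)) (j : Nat) (hj : j < rs.length) (v : List Int) :
    keysOf (rs.set j v) = (keysOf rs).set j (v.getD 0 0 - v.getD 1 0, (j : Int)) := by
  apply List.ext_getElem
  · simp [keysOf]
  · intro k hk hk'
    simp only [keysOf, List.length_set, List.length_map, List.length_range] at hk hk' ⊢
    rw [List.getElem_set]
    simp only [List.getElem_map, List.getElem_range]
    by_cases hkj : k = j
    · subst hkj
      simp [List.getD_eq_getElem?_getD, hj]
    · have hne : ¬ j = k := fun h => hkj h.symm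
      simp [List.getD_eq_getElem?_getD, List.getElem?_set_ne hne, hkj]
      exact hne

theorem keysOf_append_singleton (rs : List (List Int)) (u : List Int) :
    keysOf (rs ++ [u]) = keysOf rs ++ [(u.getD 0 0 - u.getD 1 0, (rs.length : Int))] := by
  apply List.ext_getElem
  · simp [keysOf]
  · intro k hk hk'
    simp only [keysOf, List.length_append, List.length_map, List.length_range,
      List.length_singleton] at hk hk'
    by_cases hkl : k < rs.length
    · rw [List.getElem_append_left (by simp [keysOf]; omega)]
      simp only [keysOf, List.getElem_map, List.getElem_range]
      simp [List.getD_eq_getElem?_getD, List.getElem?_append_left hkl]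
    · have hk0 : k = rs.length := by omega
      subst hk0
      rw [List.getElem_append_right (by simp [keysOf])]
      simp only [keysOf, List.getElem_map, List.getElem_range, List.length_map, List.length_range]
      simp [List.getD_eq_getElem?_getD]


theorem getD_mem_of_lt (rs : List (List Int)) (j : Nat) (h : j < rs.length) :
    rs.getD j [] ∈ rs := by
  rw [List.getD_eq_getElem?_getD, List.getElem?_eq_getElem h]
  exact List.getElem_mem h

theorem set1_getD1 (r : List Int) (h : r.length = 3) (v : Int) : (r.set 1 v).getD 1 0 = v := by
  simp [List.getD_eq_getElem?_getD, h]

theorem set1_getD0 (r : List Int) (v : Int) : (r.set 1 v).getD 0 0 = r.getD 0 0 := by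
  simp [List.getD_eq_getElem?_getD, List.getElem?_set_ne (by omega : (1:Nat) ≠ 0)]

-- one parallel step: same results, invariant preserved
theorem step_main (rs : List (List Int)) (pend : List (Int × Int))
    (h : InvB rs pend) (hne : 1 ≤ rs.length) :
    stepA rs (rs.length : Int) = (stepB (rs, pend) (rs.length : Int)).1
    ∧ InvB (stepA rs (rs.length : Int)) (stepB (rs, pend) (rs.length : Int)).2 := by
  obtain ⟨hshape, hperm, hsort⟩ := h
  have hplen : pend.length = rs.length := by
    simpa [length_keysOf] using hperm.length_eq
  cases pend with
  | nil => simp at hplen; omega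
  | cons old rest =>
  obtain ⟨j, hj, holdeq⟩ := mem_keysOf rs old (hperm.subset (List.mem_cons_self))
  -- abbreviations for row j
  set r : List Int := rs.getD j [] with hr
  have hr3 : r.length = 3 := hshape r (getD_mem_of_lt rs j hj)
  -- j is the first index of maximal width
  have hbest : ∀ k, k < rs.length → k ≠ j →
      wN rs k < wN rs j ∨ (wN rs k = wN rs j ∧ j < k) := by
    intro k hk hkj
    have hmemk := keysOf_getElem' rs k hk
    have hkmem : ((rs.getD k []).getD 0 0 - (rs.getD k []).getD 1 0, (k : Int)) ∈ rest := by
      rcases List.mem_cons.1 (hperm.symm.subset hmemk) with heq | hmem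
      · exfalso
        rw [holdeq] at heq
        have : (k : Int) = (j : Int) := congrArg Prod.snd heq
        omega
      · exact hmem
    have hple := (List.pairwise_cons.1 hsort).1 _ hkmem
    rw [holdeq] at hple
    unfold PLE PLT at hple
    simp only at hple
    unfold wN
    rw [← hr]
    have hkj' : (k : Int) ≠ (j : Int) := by omega
    omega
  obtain ⟨t, hfold, htlt, hmax, hfirst⟩ := scan_spec rs rs.length hne
  have htj : t = j := by
    by_contra hne'
    rcases hbest t htlt hne' with hlt | ⟨heqw, hjt⟩
    · have := hmax j hj
      omega
    · have := hfirst j hjt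
      omega
  subst htj
  -- A's scanned index, in pyRange form
  have hidx : (PySem.List.pyRange 0 ((rs.length : Nat) : Int) 1).foldl
      (fun index j => if pvWid rs j > pvWid rs index then j else index) 0 = (t : Int) := by
    rw [PySem.List.pyRange_zero_nat, List.foldl_map]
    exact hfold
  -- the two new states agree on results
  have hold2 : old.2 = (t : Int) := by rw [holdeq]
  have hrsEq : stepA rs (rs.length : Int) = (stepB (rs, old :: rest) (rs.length : Int)).1 := by
    simp only [stepA, stepB, hidx, hold2]
  set mid : Int := PySem.Int.floordiv (r.getD 0 0 + r.getD 1 0) 2 with hmid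
  have hA : stepA rs (rs.length : Int)
      = rs.set t (r.set 1 mid) ++ [[mid + 1, r.getD 1 0, (rs.length : Int) + 1]] := by
    simp only [stepA, hidx]
    simp [pvEnt, PySem.List.pySetD_of_nonneg, PySem.List.pyGetD_ofNat', hmid, hr, List.getD_eq_getElem?_getD]
  have hB2 : (stepB (rs, old :: rest) (rs.length : Int)).2
      = insortB (insortB rest (r.getD 0 0 - mid, (t : Int)))
          (mid + 1 - r.getD 1 0, (rs.length : Int)) := by
    simp only [stepB]
    simp [pvEnt, hold2, PySem.List.pyGetD_ofNat', hmid, hr, List.getD_eq_getElem?_getD]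
  refine ⟨hrsEq, ?_, ?_, ?_⟩
  · -- shape
    rw [hA]
    intro row hrow
    rcases List.mem_append.1 hrow with hrow | hrow
    · rcases List.mem_or_eq_of_mem_set hrow with hrow | hrow
      · exact hshape row hrow
      · subst hrow
        simp [hr3]
    · simp only [List.mem_singleton] at hrow
      subst hrow
      rfl
  · -- permutation with the keys of the new rows
    rw [hB2, hA]
    have hkeys2 : keysOf (rs.set t (r.set 1 mid) ++ [[mid + 1, r.getD 1 0, (rs.length : Int) + 1]])
        = (keysOf rs).set t (r.getD 0 0 - mid, (t : Int))
          ++ [(mid + 1 - r.getD 1 0, (rs.length : Int))] := by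
      rw [keysOf_append_singleton, keysOf_set rs t hj]
      rw [set1_getD0, set1_getD1 r hr3]
      simp
    rw [hkeys2]
    have htk : t < (keysOf rs).length := by rw [length_keysOf]; exact hj
    have hK : (keysOf rs)[t]'htk = old := by
      rw [keysOf_getElem rs t hj, holdeq]
    have e1 : (keysOf rs).Perm (old :: (keysOf rs).eraseIdx t) := by
      rw [← hK]
      exact (List.getElem_cons_eraseIdx_perm htk).symm
    have e2 : rest.Perm ((keysOf rs).eraseIdx t) := (hperm.trans e1).cons_inv
    have hch : (insortB (insortB rest (r.getD 0 0 - mid, (t : Int)))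
          (mid + 1 - r.getD 1 0, (rs.length : Int))).Perm
        ((mid + 1 - r.getD 1 0, (rs.length : Int)) :: (r.getD 0 0 - mid, (t : Int)) :: rest) :=
      (insortB_perm _ _).trans ((insortB_perm rest _).cons _)
    refine hch.trans ?_
    refine List.Perm.trans ?_ (List.perm_append_singleton _ _).symm
    exact (((e2.cons _).trans (List.set_perm_cons_eraseIdx htk _).symm).cons _)
  · -- sortedness of the new pending list
    rw [hB2]
    exact insortB_sorted _ _ (insortB_sorted _ _ (List.pairwise_cons.1 hsort).2)

theorem length_stepA (rs : List (List Int)) (i : Int) : (stepA rs i).length = rs.length + 1 := by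
  simp [stepA, PySem.List.length_pySetD]

theorem loop_main (m : Nat) : ∀ (rs : List (List Int)) (pend : List (Int × Int)),
    InvB rs pend → 1 ≤ rs.length →
    (PySem.List.pyRange (rs.length : Int) ((rs.length : Int) + (m : Int)) 1).foldl stepA rs
    = ((PySem.List.pyRange (rs.length : Int) ((rs.length : Int) + (m : Int)) 1).foldl
        stepB (rs, pend)).1 := by
  induction m with
  | zero =>
    intro rs pend _ _
    rw [PySem.List.pyRange_one_eq_nil (by omega)]
    simp
  | succ m ih =>
    intro rs pend hInv hlen
    have hcons : PySem.List.pyRange (rs.length : Int) ((rs.length : Int) + ((m : Nat) + 1 : Nat)) 1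
        = (rs.length : Int) :: PySem.List.pyRange ((rs.length : Int) + 1)
            ((rs.length : Int) + ((m : Nat) + 1 : Nat)) 1 :=
      PySem.List.pyRange_one_cons (by push_cast; omega)
    obtain ⟨hEq, hInv2⟩ := step_main rs pend hInv hlen
    have hlen2 : (stepA rs (rs.length : Int)).length = rs.length + 1 := length_stepA rs _
    have hstB : stepB (rs, pend) (rs.length : Int)
        = (stepA rs (rs.length : Int), (stepB (rs, pend) (rs.length : Int)).2) := by
      rw [hEq]
    have harith : ((rs.length : Int) + ((m : Nat) + 1 : Nat))
        = (((stepA rs (rs.length : Int)).length : Int) + (m : Int)) := by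
      rw [hlen2]; push_cast; ring
    have hstart : ((rs.length : Int) + 1) = ((stepA rs (rs.length : Int)).length : Int) := by
      rw [hlen2]; push_cast; ring
    rw [hcons, List.foldl_cons, List.foldl_cons, hstB, harith, hstart]
    exact ih (stepA rs (rs.length : Int)) ((stepB (rs, pend) (rs.length : Int)).2) hInv2
      (by omega)

theorem consistentHashing_spec : Claim_equal_consistentHashing := by
  unfold Claim_equal_consistentHashing Spec_consistentHashing
  intro n _
  unfold consistentHashing consistentHashing_alt
  by_cases hn : n ≤ 1
  · rw [PySem.List.pyRange_one_eq_nil hn]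
    simp
  · have h0 : InvB [[0, 359, 1]] [(-359, 0)] := by
      refine ⟨by simp, ?_, by simp⟩
      have hk : keysOf [[0, 359, 1]] = [(-359, 0)] := by decide
      rw [hk]
    have hmain := loop_main (n - 1).toNat [[0, 359, 1]] [(-359, 0)] h0 (by simp)
    have hlen1 : (([[0, 359, 1]] : List (List Int)).length : Int) = 1 := by simp
    rw [hlen1] at hmain
    have hcast : (1 : Int) + (((n - 1).toNat : Nat) : Int) = n := by omega
    rw [hcast] at hmain
    exact hmain
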